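-- pv_equiv track=rewrite | github.com/FriedStan/PSCP | surprising_vote.py | store_review
-- ===== SOURCE A (Python) =====
-- def store_review(review_high, review_left):
--     """Surprising innit"""
--     count = review_high
--     review_lowest = review_left - count
--     while review_lowest < 0:
--         review_lowest = review_left - count
--         count -= 1
--     if review_high - review_lowest > 2:
--         text = "Surprising"
--     else:
--         text = "Not surprising"
--     return text
-- ===== SOURCE B (Python) =====
-- def store_review(review_high, review_left):
--     """Surprising innit"""
--     review_lowest = max(0, review_left - review_high)
--     if review_high - review_lowest > 2:
--         return "Surprising"
--     return "Not surprising"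
-- ===== Notes on version B (the rewrite author's own statement) =====
-- stated objective: faster
-- what changed: Replaced the decrementing while-loop (which for integer inputs just drives review_lowest up to max(0, review_left - review_high)) by that closed-form expression.
import Mathlib
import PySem

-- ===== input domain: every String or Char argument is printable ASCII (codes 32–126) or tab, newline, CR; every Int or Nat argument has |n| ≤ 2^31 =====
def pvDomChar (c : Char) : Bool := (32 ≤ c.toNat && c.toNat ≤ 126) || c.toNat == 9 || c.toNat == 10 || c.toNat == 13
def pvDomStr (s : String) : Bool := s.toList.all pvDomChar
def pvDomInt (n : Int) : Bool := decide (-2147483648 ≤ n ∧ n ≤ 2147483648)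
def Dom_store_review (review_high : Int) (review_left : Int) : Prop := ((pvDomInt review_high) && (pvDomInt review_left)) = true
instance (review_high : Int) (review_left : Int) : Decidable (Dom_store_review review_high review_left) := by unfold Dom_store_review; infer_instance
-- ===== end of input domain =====

-- B replaces A's decrementing while-loop by the closed form max(0, review_left - review_high): O(1) instead of O(review_high - review_left).

-- ===== PORT A =====
-- A's while-loop, transliterated with a fuel guard that only makes the recursion
-- total; the fuel chosen in store_review is proved sufficient below, so the port
-- computes exactly what the Python loop computes.
def storeReviewLoopA (fuel : Nat) (count : Int) (review_lowest : Int) (review_left : Int) : Int :=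
  match fuel with
  | 0 => review_lowest
  | fuel + 1 =>
    if review_lowest < 0 then
      storeReviewLoopA fuel (count - 1) (review_left - count) review_left
    else
      review_lowest

def store_review (review_high : Int) (review_left : Int) : String :=
  let count := review_high
  let review_lowest := review_left - count
  let review_lowest := storeReviewLoopA ((review_high - review_left).toNat + 2) count review_lowest review_left
  if review_high - review_lowest > 2 then "Surprising" else "Not surprising"

-- ===== PORT B =====
def store_review_alt (review_high : Int) (review_left : Int) : String :=
  let review_lowest := max 0 (review_left - review_high)
  if review_high - review_lowest > 2 then "Surprising" else "Not surprising"

-- ===== PRECONDITION & SPEC =====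
def Spec_store_review (review_high : Int) (review_left : Int) (out : String) : Prop := out = store_review_alt review_high review_left
instance (review_high : Int) (review_left : Int) (out : String) : Decidable (Spec_store_review review_high review_left out) := by unfold Spec_store_review; infer_instance

-- ===== CLAIM (what is proved, stated in full; the proofs are below) =====
def Claim_equal_store_review : Prop := ∀ (review_high : Int) (review_left : Int), Dom_store_review review_high review_left → Spec_store_review review_high review_left (store_review review_high review_left)

-- ===== LEMMAS AND PROOFS =====

-- After the first iteration the loop state satisfies review_lowest = -k and
-- count = review_left - 1 + k; with fuel ≥ k it returns 0.
lemma storeReviewLoopA_inv (k : Nat) : ∀ (fuel : Nat) (L : Int), k ≤ fuel →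
    storeReviewLoopA fuel (L - 1 + (k : Int)) (-(k : Int)) L = 0 := by
  induction k with
  | zero =>
    intro fuel L _
    cases fuel with
    | zero => simp [storeReviewLoopA]
    | succ f => simp [storeReviewLoopA]
  | succ k ih =>
    intro fuel L hf
    cases fuel with
    | zero => omega
    | succ f =>
      have hneg : (-(((k : Int)) + 1)) < 0 := by omega
      have harg : L - (L - 1 + ((k : Int) + 1)) = -(k : Int) := by ring
      have harg2 : L - 1 + ((k : Int) + 1) - 1 = L - 1 + (k : Int) := by ring
      simp only [storeReviewLoopA, Nat.cast_succ]
      rw [if_pos hneg, harg, harg2]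
      exact ih f L (by omega)

lemma storeReviewLoopA_value (H L : Int) :
    storeReviewLoopA ((H - L).toNat + 2) H (L - H) L = max 0 (L - H) := by
  by_cases h : L - H < 0
  · -- loop runs: first iteration re-computes L - H, then climbs to 0
    have h1 : storeReviewLoopA ((H - L).toNat + 2) H (L - H) L
        = storeReviewLoopA ((H - L).toNat + 1) (H - 1) (L - H) L := by
      simp only [storeReviewLoopA]
      rw [if_pos h]
    have hk : H - 1 = L - 1 + ((H - L).toNat : Int) := by omega
    have hl : L - H = -(((H - L).toNat : Int)) := by omega
    have h2 := storeReviewLoopA_inv (H - L).toNat ((H - L).toNat + 1) L (by omega)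
    rw [h1, hk, hl, h2]
    omega
  · -- loop never runs
    simp only [storeReviewLoopA]
    rw [if_neg h]
    omega

-- ===== VERDICT (by name: the statement is the Claim_ definition above) =====
theorem store_review_spec : Claim_equal_store_review := by
  intro H L _
  show store_review H L = store_review_alt H L
  simp only [store_review, store_review_alt, storeReviewLoopA_value H L]
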